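-- pv_equiv track=rewrite | github.com/takahashiJe/matsuo_llm2025_mainCompe | scripts/filter_phase12_noise_20260212_v1.py | get_turns
-- ===== SOURCE A (Python) =====
-- from typing import Dict, Iterable, Iterator, Optional, Tuple
--
-- def get_turns(row: Dict) -> Tuple[str, str, str]:
--     system = ""
--     user = ""
--     assistant = ""
--     for m in row.get("messages", []):
--         if not isinstance(m, dict):
--             continue
--         role = m.get("role")
--         content = str(m.get("content", ""))
--         if role == "system" and not system:
--             system = content
--         elif role == "user" and not user:
--             user = content
--         elif role == "assistant" and not assistant:
--             assistant = content
--     return system, user, assistant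
-- ===== SOURCE B (Python) =====
-- def get_turns(row):
--     msgs = row.get("messages", [])
--
--     def first_nonempty(role):
--         for m in msgs:
--             if not isinstance(m, dict):
--                 continue
--             if m.get("role") == role:
--                 c = str(m.get("content", ""))
--                 if c:
--                     return c
--         return ""
--
--     return (first_nonempty("system"), first_nonempty("user"), first_nonempty("assistant"))
-- ===== Notes on version B (the rewrite author's own statement) =====
-- stated objective: simpler
-- what changed: Replaces A's single combined pass with mutable triple state by a first_nonempty(role) helper run as three independent early-returning scans, one per role.
import Mathlib
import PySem

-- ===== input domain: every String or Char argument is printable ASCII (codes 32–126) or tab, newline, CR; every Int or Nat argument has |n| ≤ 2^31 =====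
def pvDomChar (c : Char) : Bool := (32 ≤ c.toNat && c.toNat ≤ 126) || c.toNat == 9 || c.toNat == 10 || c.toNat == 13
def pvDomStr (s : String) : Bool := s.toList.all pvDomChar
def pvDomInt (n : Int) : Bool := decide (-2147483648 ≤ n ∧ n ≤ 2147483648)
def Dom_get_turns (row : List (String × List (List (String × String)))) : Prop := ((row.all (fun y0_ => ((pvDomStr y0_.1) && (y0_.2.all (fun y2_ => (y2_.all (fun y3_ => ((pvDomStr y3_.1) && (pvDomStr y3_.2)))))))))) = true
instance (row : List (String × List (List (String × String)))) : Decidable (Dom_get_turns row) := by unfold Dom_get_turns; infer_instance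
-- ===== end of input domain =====

-- B replaces A's single combined pass (mutable triple state) with a first-nonempty
-- helper run as three independent per-role scans; objective: simpler decomposition.

-- dict lookup on an association list: first match (Python dict values in insertion order)
def pget? {a : Type} (d : List (String × a)) (k : String) : Option a := List.lookup k d
def pgetD {a : Type} (d : List (String × a)) (k : String) (dflt : a) : a := (List.lookup k d).getD dflt

-- ===== PORT A =====
-- single pass over messages, triple accumulator (system, user, assistant);
-- every element is a dict by typing, so Python's isinstance check is always true.
def get_turns (row : List (String × List (List (String × String)))) : String × String × String :=
  let msgs := pgetD row "messages" []
  msgs.foldl (fun st m =>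
    let role := pget? m "role"
    let content := pgetD m "content" ""
    if role = some "system" ∧ st.1 = "" then (content, st.2.1, st.2.2)
    else if role = some "user" ∧ st.2.1 = "" then (st.1, content, st.2.2)
    else if role = some "assistant" ∧ st.2.2 = "" then (st.1, st.2.1, content)
    else st) ("", "", "")

-- ===== PORT B =====
-- first_nonempty: scan for the first message of the given role whose content is non-empty
def firstNonempty (msgs : List (List (String × String))) (role : String) : String :=
  match msgs with
  | [] => ""
  | m :: rest =>
    if pget? m "role" = some role then
      let c := pgetD m "content" ""
      if c ≠ "" then c else firstNonempty rest role
    else firstNonempty rest role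

def get_turns_alt (row : List (String × List (List (String × String)))) : String × String × String :=
  let msgs := pgetD row "messages" []
  (firstNonempty msgs "system", firstNonempty msgs "user", firstNonempty msgs "assistant")

-- ===== PRECONDITION & SPEC =====
def Spec_get_turns (row : List (String × List (List (String × String)))) (out : String × String × String) : Prop := out = get_turns_alt row
instance (row : List (String × List (List (String × String)))) (out : String × String × String) : Decidable (Spec_get_turns row out) := by unfold Spec_get_turns; infer_instance

-- ===== CLAIM (what is proved, stated in full; the proofs are below) =====
def Claim_equal_get_turns : Prop := ∀ (row : List (String × List (List (String × String)))), Dom_get_turns row → Spec_get_turns row (get_turns row)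

-- ===== LEMMAS AND PROOFS =====

-- proof-side helpers: the result of continuing a per-role scan from an accumulator,
-- and the per-component effect of A's fold step
def fillFrom (acc : String) (msgs : List (List (String × String))) (role : String) : String :=
  if acc = "" then firstNonempty msgs role else acc

def updOne (m : List (String × String)) (acc role : String) : String :=
  if pget? m "role" = some role ∧ acc = "" then pgetD m "content" "" else acc

theorem comp_step (m : List (String × String)) (rest : List (List (String × String)))
    (r s : String) : fillFrom (updOne m s r) rest r = fillFrom s (m :: rest) r := by
  by_cases hs : s = "" <;> by_cases hr : pget? m "role" = some r <;>
    by_cases hc : pgetD m "content" "" = "" <;>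
      simp [fillFrom, updOne, firstNonempty, hs, hr, hc]

theorem step_eq (m : List (String × String)) (s u a : String) :
    (if pget? m "role" = some "system" ∧ s = "" then (pgetD m "content" "", u, a)
     else if pget? m "role" = some "user" ∧ u = "" then (s, pgetD m "content" "", a)
     else if pget? m "role" = some "assistant" ∧ a = "" then (s, u, pgetD m "content" "")
     else (s, u, a))
    = (updOne m s "system", updOne m u "user", updOne m a "assistant") := by
  by_cases h1 : pget? m "role" = some "system"
  · have h2 : ¬ pget? m "role" = some "user" := by rw [h1]; decide
    have h3 : ¬ pget? m "role" = some "assistant" := by rw [h1]; decide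
    by_cases hs : s = "" <;> simp [updOne, h1, hs]
  · by_cases h2 : pget? m "role" = some "user"
    · have h3 : ¬ pget? m "role" = some "assistant" := by rw [h2]; decide
      by_cases hu : u = "" <;> simp [updOne, h2, hu]
    · by_cases h3 : pget? m "role" = some "assistant"
      · by_cases ha : a = "" <;> simp [updOne, h3, ha]
      · simp [updOne, h1, h2, h3]

theorem foldl_eq_fillFrom (msgs : List (List (String × String))) :
    ∀ s u a : String,
      msgs.foldl (fun st m =>
        let role := pget? m "role"
        let content := pgetD m "content" ""
        if role = some "system" ∧ st.1 = "" then (content, st.2.1, st.2.2)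
        else if role = some "user" ∧ st.2.1 = "" then (st.1, content, st.2.2)
        else if role = some "assistant" ∧ st.2.2 = "" then (st.1, st.2.1, content)
        else st) (s, u, a)
      = (fillFrom s msgs "system", fillFrom u msgs "user", fillFrom a msgs "assistant") := by
  induction msgs with
  | nil => intro s u a; simp [fillFrom, firstNonempty]
  | cons m rest ih =>
    intro s u a
    simp only [List.foldl_cons]
    have h := step_eq m s u a
    simp only at h
    rw [h, ih, comp_step, comp_step, comp_step]

-- ===== VERDICT (by name: the statement is the Claim_ definition above) =====
theorem get_turns_spec : Claim_equal_get_turns := by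
  intro row _
  unfold Spec_get_turns get_turns get_turns_alt
  simp only [foldl_eq_fillFrom]
  rfl
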